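-- pv_equiv track=rewrite | github.com/AlmaKirsti/human-design-api | app.py | get_hd_type
-- ===== SOURCE A (Python) =====
-- MOTORS = {'Sacral', 'Heart', 'Solar Plexus', 'Root'}
--
-- def get_hd_type(defined: set[str], active_pairs: list) -> str:
--     if not defined:
--         return 'Reflector'
--
--     adj: dict[str, set[str]] = {}
--     for c1, c2 in active_pairs:
--         adj.setdefault(c1, set()).add(c2)
--         adj.setdefault(c2, set()).add(c1)
--
--     motor_to_throat = False
--     if 'Throat' in defined:
--         for motor in MOTORS:
--             if motor not in adj:
--                 continue
--             visited: set[str] = set()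
--             queue = [motor]
--             while queue:
--                 node = queue.pop()
--                 if node == 'Throat':
--                     motor_to_throat = True
--                     break
--                 if node in visited:
--                     continue
--                 visited.add(node)
--                 queue.extend(adj.get(node, []))
--             if motor_to_throat:
--                 break
--
--     sacral = 'Sacral' in defined
--     if sacral and motor_to_throat:
--         return 'Manifesting Generator'
--     if sacral:
--         return 'Generator'
--     if motor_to_throat:
--         return 'Manifestor'
--     return 'Projector'
-- ===== SOURCE B (Python) =====
-- MOTORS = {'Sacral', 'Heart', 'Solar Plexus', 'Root'}
--
-- def get_hd_type(defined: set[str], active_pairs: list) -> str: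
--     if not defined:
--         return 'Reflector'
--
--     # Instead of building an adjacency dict and running a stack search from each
--     # motor, saturate the set of nodes reachable from 'Throat' by whole-frontier
--     # fixed-point iteration directly over the edge list; by symmetry of the
--     # undirected graph, some motor reaches the throat iff the throat reaches a motor.
--     motor_to_throat = False
--     if 'Throat' in defined:
--         reach = {'Throat'}
--         while True:
--             new = reach \
--                 | {b for a, b in active_pairs if a in reach} \
--                 | {a for a, b in active_pairs if b in reach}
--             if new == reach:
--                 break
--             reach = new
--         motor_to_throat = not MOTORS.isdisjoint(reach)
--
--     sacral = 'Sacral' in defined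
--     if sacral and motor_to_throat:
--         return 'Manifesting Generator'
--     if sacral:
--         return 'Generator'
--     if motor_to_throat:
--         return 'Manifestor'
--     return 'Projector'
-- ===== Notes on version B (the rewrite author's own statement) =====
-- stated objective: alternative
-- what changed: A builds an adjacency dict and runs a separate stack search towards 'Throat' from each of the four motor centers; B keeps no adjacency structure at all and instead saturates the set of nodes reachable from 'Throat' by fixed-point iteration over the raw edge list, then tests that set against MOTORS, using the symmetry of the undirected graph.
import Mathlib
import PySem

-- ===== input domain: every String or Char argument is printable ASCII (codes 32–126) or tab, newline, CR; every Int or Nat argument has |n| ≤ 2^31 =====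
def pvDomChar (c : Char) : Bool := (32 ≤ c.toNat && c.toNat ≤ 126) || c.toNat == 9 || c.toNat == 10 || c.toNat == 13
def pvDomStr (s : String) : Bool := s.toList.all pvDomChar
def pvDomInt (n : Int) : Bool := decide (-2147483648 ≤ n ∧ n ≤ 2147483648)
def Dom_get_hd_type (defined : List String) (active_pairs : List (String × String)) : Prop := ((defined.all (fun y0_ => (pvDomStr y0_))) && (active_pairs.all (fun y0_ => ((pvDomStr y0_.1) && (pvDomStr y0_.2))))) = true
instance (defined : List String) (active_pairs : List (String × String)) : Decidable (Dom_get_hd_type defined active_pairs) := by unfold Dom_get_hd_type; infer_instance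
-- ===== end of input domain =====

-- B replaces A's adjacency dict plus per-motor stack searches by a single whole-frontier
-- fixed-point saturation of the set reachable from 'Throat' over the raw edge list,
-- then a disjointness test against MOTORS (symmetry of the undirected graph); objective: alternative.

-- ===== PORT A =====

-- A's adjacency dict built from active_pairs (the Python loop
-- 'adj.setdefault(c1, set()).add(c2); adj.setdefault(c2, set()).add(c1)')
def buildAdj (active_pairs : List (String × String)) : PySem.Dict String (PySem.Set String) :=
  active_pairs.foldl
    (fun d p =>
      (d.modify p.1 [] (fun s => PySem.Set.add s p.2)).modify p.2 [] (fun s => PySem.Set.add s p.1))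
    PySem.Dict.empty

-- every string occurring in active_pairs (termination scaffolding only: the universe the
-- ports' growing sets live inside)
def nodesOf (active_pairs : List (String × String)) : List String :=
  active_pairs.foldr (fun p acc => p.1 :: p.2 :: acc) []

-- membership in the built adjacency (needed by the ports' hypothesis arguments)
theorem mem_getD_step (d : PySem.Dict String (PySem.Set String)) (c1 c2 v w : String) :
    w ∈ ((d.modify c1 [] (fun s => PySem.Set.add s c2)).modify c2 [] (fun s => PySem.Set.add s c1)).getD v [] ↔
      w ∈ d.getD v [] ∨ (c1 = v ∧ c2 = w) ∨ (c1 = w ∧ c2 = v) := by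
  simp only [PySem.Dict.getD_modify]
  split_ifs with h2 h1 h1 <;> subst_vars <;> simp [PySem.Set.mem_add] <;> tauto

theorem mem_getD_buildAdj_go (pairs : List (String × String)) (d : PySem.Dict String (PySem.Set String)) (v w : String) :
    w ∈ (pairs.foldl (fun d p => (d.modify p.1 [] (fun s => PySem.Set.add s p.2)).modify p.2 [] (fun s => PySem.Set.add s p.1)) d).getD v [] ↔
      w ∈ d.getD v [] ∨ ∃ p ∈ pairs, (p.1 = v ∧ p.2 = w) ∨ (p.1 = w ∧ p.2 = v) := by
  induction pairs generalizing d with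
  | nil => simp
  | cons p t ih =>
    simp only [List.foldl_cons, ih, mem_getD_step, List.mem_cons]
    aesop

theorem mem_getD_buildAdj_iff (active_pairs : List (String × String)) (v w : String) :
    w ∈ (buildAdj active_pairs).getD v [] ↔
      ∃ p ∈ active_pairs, (p.1 = v ∧ p.2 = w) ∨ (p.1 = w ∧ p.2 = v) := by
  simpa [buildAdj, PySem.Dict.getD_empty] using mem_getD_buildAdj_go active_pairs PySem.Dict.empty v w

theorem mem_nodesOf (active_pairs : List (String × String)) (x : String) :
    x ∈ nodesOf active_pairs ↔ ∃ p ∈ active_pairs, p.1 = x ∨ p.2 = x := by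
  induction active_pairs with
  | nil => simp [nodesOf]
  | cons p t ih => simp only [nodesOf, List.foldr_cons] at ih ⊢; simp [List.mem_cons, ih]; aesop

theorem mem_getD_buildAdj_nodes (active_pairs : List (String × String)) (v w : String)
    (h : w ∈ (buildAdj active_pairs).getD v []) : w ∈ nodesOf active_pairs := by
  rw [mem_getD_buildAdj_iff] at h
  rw [mem_nodesOf]
  obtain ⟨p, hp, h | h⟩ := h
  · exact ⟨p, hp, Or.inr h.2⟩
  · exact ⟨p, hp, Or.inl h.1⟩

-- a filter by a strictly smaller predicate is shorter
theorem length_filter_lt_of {a : Type} [DecidableEq a] (l : List a) (p q : a → Bool)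
    (hpq : ∀ x, q x = true → p x = true) (v : a) (hv : v ∈ l)
    (hpv : p v = true) (hqv : q v = false) :
    (l.filter q).length < (l.filter p).length := by
  induction l with
  | nil => cases hv
  | cons b t ih =>
    rcases List.mem_cons.mp hv with rfl | hvt
    · have hle : (t.filter q).length <= (t.filter p).length := by
        simpa [← List.countP_eq_length_filter] using List.countP_mono_left (fun x _ hx => hpq x hx)
      simp [hpv, hqv]
      omega
    · have := ih hvt
      by_cases hq : q b = true
      · simp [hq, hpq b hq]; omega
      · have hq' : q b = false := by simpa using hq
        by_cases hp : p b = true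
        · simp_all
          omega
        · simp_all

-- strict decrease of the unvisited count (termination of A's while loop)
theorem unvisited_lt (U : List String) (visited : PySem.Set String) (node : String)
    (hU : node ∈ U) (hnv : node ∉ visited) :
    (U.filter (fun u => !(PySem.Set.contains (PySem.Set.add visited node) u))).length <
      (U.filter (fun u => !(PySem.Set.contains visited u))).length := by
  have hc : PySem.Set.contains visited node = false := by
    by_contra h
    exact hnv ((PySem.Set.contains_iff _ _).mp (by simpa using h))
  have hqv : (fun u => !(PySem.Set.contains (PySem.Set.add visited node) u)) node = false := by
    have h1 : (PySem.Set.add visited node).contains node = true :=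
      (PySem.Set.contains_iff (PySem.Set.add visited node) node).mpr
        ((PySem.Set.mem_add visited node node).mpr (Or.inr rfl))
    simp only [h1, Bool.not_true]
  have hpv : (fun u => !(PySem.Set.contains visited u)) node = true := by
    simp only [Bool.not_eq_true', hc]
  have hpq : ∀ x, (fun u => !(PySem.Set.contains (PySem.Set.add visited node) u)) x = true →
      (fun u => !(PySem.Set.contains visited u)) x = true := by
    intro x hx
    simp only [Bool.not_eq_true'] at hx ⊢
    by_contra h
    have hx' : x ∈ PySem.Set.add visited node :=
      (PySem.Set.mem_add visited node x).mpr
        (Or.inl ((PySem.Set.contains_iff visited x).mp (by simpa using h)))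
    have h2 : (PySem.Set.add visited node).contains x = true :=
      (PySem.Set.contains_iff (PySem.Set.add visited node) x).mpr hx'
    rw [hx] at h2
    exact absurd h2 Bool.false_ne_true
  exact length_filter_lt_of U _ _ hpq node hU hpv hqv

-- A's inner while loop: stack search from one motor, stopping as soon as 'Throat' is popped.
-- U, hadj, hq are proof arguments for termination only.
def bfsA (adj : PySem.Dict String (PySem.Set String)) (U : List String)
    (hadj : ∀ v w, w ∈ adj.getD v [] → w ∈ U)
    (visited : PySem.Set String) (queue : List String)
    (hq : ∀ x ∈ queue, x ∈ U) : Bool :=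
  match queue with
  | [] => false
  | x :: xs =>
    let node := (x :: xs).getLast (List.cons_ne_nil x xs)
    if node = "Throat" then true
    else if PySem.Set.contains visited node then
      bfsA adj U hadj visited ((x :: xs).dropLast)
        (fun y hy => hq y (List.mem_of_mem_dropLast hy))
    else
      bfsA adj U hadj (PySem.Set.add visited node) ((x :: xs).dropLast ++ adj.getD node [])
        (fun y hy => (List.mem_append.mp hy).elim
          (fun h => hq y (List.mem_of_mem_dropLast h)) (fun h => hadj node y h))
  termination_by ((U.filter (fun u => !(PySem.Set.contains visited u))).length, queue.length)
  decreasing_by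
  · apply Prod.Lex.right
    simp
  · apply Prod.Lex.left
    exact unvisited_lt U visited _ (hq _ (List.getLast_mem _)) (by
      intro hmem
      exact (by assumption : ¬ PySem.Set.contains visited ((x :: xs).getLast (List.cons_ne_nil x xs)) = true)
        ((PySem.Set.contains_iff _ _).mpr hmem))

def get_hd_type (defined : List String) (active_pairs : List (String × String)) : String :=
  if defined.isEmpty then "Reflector"
  else
    let adj := buildAdj active_pairs
    let motor_to_throat :=
      if defined.contains "Throat" then
        ["Sacral", "Heart", "Solar Plexus", "Root"].any (fun motor =>
          if !(adj.contains motor) then false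
          else bfsA adj (motor :: nodesOf active_pairs)
            (fun v w hw => List.mem_cons_of_mem _ (mem_getD_buildAdj_nodes active_pairs v w hw))
            [] [motor] (fun y hy => by simp at hy; simp [hy]))
      else false
    let sacral := defined.contains "Sacral"
    if sacral && motor_to_throat then "Manifesting Generator"
    else if sacral then "Generator"
    else if motor_to_throat then "Manifestor"
    else "Projector"

-- ===== PORT B =====

-- B's frontier expansion: 'reach | {b for a,b in active_pairs if a in reach} | {a for a,b in active_pairs if b in reach}'
-- (each comprehension ported as a fold over the edge list adding into the growing set)
def expandR (pairs : List (String × String)) (reach : PySem.Set String) : PySem.Set String :=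
  let s1 := pairs.foldl
    (fun s p => if PySem.Set.contains reach p.1 then PySem.Set.add s p.2 else s) reach
  pairs.foldl
    (fun s p => if PySem.Set.contains reach p.2 then PySem.Set.add s p.1 else s) s1

-- membership in one expansion fold (scaffolding the port's hypothesis arguments need)
theorem mem_foldl_add_if (l : List (String × String)) (c : String × String → Bool)
    (g : String × String → String) (s0 : PySem.Set String) (x : String) :
    x ∈ l.foldl (fun s p => if c p then PySem.Set.add s (g p) else s) s0 ↔
      x ∈ s0 ∨ ∃ p ∈ l, c p = true ∧ g p = x := by
  induction l generalizing s0 with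
  | nil => simp
  | cons p t ih =>
    rw [List.foldl_cons, ih]
    by_cases hc : c p = true
    · rw [if_pos hc]
      simp only [PySem.Set.mem_add, List.mem_cons]
      constructor
      · rintro (⟨h | h⟩ | ⟨q, hq, h1, h2⟩)
        · exact Or.inl h
        · exact Or.inr ⟨p, Or.inl rfl, hc, h.symm⟩
        · exact Or.inr ⟨q, Or.inr hq, h1, h2⟩
      · rintro (h | ⟨q, (rfl | hq), h1, h2⟩)
        · exact Or.inl (Or.inl h)
        · exact Or.inl (Or.inr h2.symm)
        · exact Or.inr ⟨q, hq, h1, h2⟩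
    · rw [if_neg hc]
      simp only [List.mem_cons]
      constructor
      · rintro (h | ⟨q, hq, h1, h2⟩)
        · exact Or.inl h
        · exact Or.inr ⟨q, Or.inr hq, h1, h2⟩
      · rintro (h | ⟨q, (rfl | hq), h1, h2⟩)
        · exact Or.inl h
        · exact absurd h1 hc
        · exact Or.inr ⟨q, hq, h1, h2⟩

theorem mem_expandR (pairs : List (String × String)) (reach : PySem.Set String) (x : String) :
    x ∈ expandR pairs reach ↔
      x ∈ reach ∨ ∃ p ∈ pairs,
        (p.1 ∈ reach ∧ p.2 = x) ∨ (p.2 ∈ reach ∧ p.1 = x) := by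
  unfold expandR
  rw [mem_foldl_add_if, mem_foldl_add_if]
  simp only [PySem.Set.contains_iff]
  constructor
  · rintro (((h | ⟨p, hp, h1, h2⟩) | ⟨p, hp, h1, h2⟩))
    · exact Or.inl h
    · exact Or.inr ⟨p, hp, Or.inl ⟨h1, h2⟩⟩
    · exact Or.inr ⟨p, hp, Or.inr ⟨h1, h2⟩⟩
  · rintro (h | ⟨p, hp, ⟨h1, h2⟩ | ⟨h1, h2⟩⟩)
    · exact Or.inl (Or.inl h)
    · exact Or.inl (Or.inr ⟨p, hp, h1, h2⟩)
    · exact Or.inr ⟨p, hp, h1, h2⟩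

theorem subset_expandR (pairs : List (String × String)) (reach : PySem.Set String)
    (x : String) (hx : x ∈ reach) : x ∈ expandR pairs reach :=
  (mem_expandR pairs reach x).mpr (Or.inl hx)

theorem expandR_subset_U (pairs : List (String × String)) (U : List String)
    (hU : ∀ p ∈ pairs, p.1 ∈ U ∧ p.2 ∈ U) (reach : PySem.Set String)
    (hr : ∀ x ∈ reach, x ∈ U) (x : String) (hx : x ∈ expandR pairs reach) : x ∈ U := by
  rcases (mem_expandR pairs reach x).mp hx with h | ⟨p, hp, ⟨_, rfl⟩ | ⟨_, rfl⟩⟩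
  · exact hr x h
  · exact (hU p hp).2
  · exact (hU p hp).1

-- strict decrease of the unreached count (termination of B's while loop)
theorem saturate_dec (pairs : List (String × String)) (U : List String)
    (hU : ∀ p ∈ pairs, p.1 ∈ U ∧ p.2 ∈ U) (reach : PySem.Set String)
    (hr : ∀ x ∈ reach, x ∈ U)
    (hne : ¬ PySem.Set.equal (expandR pairs reach) reach = true) :
    (U.filter (fun u => !(PySem.Set.contains (expandR pairs reach) u))).length <
      (U.filter (fun u => !(PySem.Set.contains reach u))).length := by
  have hwit : ∃ x, x ∈ expandR pairs reach ∧ x ∉ reach := by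
    by_contra hno
    push_neg at hno
    exact hne ((PySem.Set.equal_iff _ _).mpr (fun x =>
      ⟨fun h => hno x h, fun h => subset_expandR pairs reach x h⟩))
  obtain ⟨x, hxn, hxr⟩ := hwit
  have hc1 : PySem.Set.contains reach x = false := by
    by_contra h
    exact hxr ((PySem.Set.contains_iff _ _).mp (by simpa using h))
  have hc2 : PySem.Set.contains (expandR pairs reach) x = true :=
    (PySem.Set.contains_iff _ _).mpr hxn
  refine length_filter_lt_of U _ _ ?_ x (expandR_subset_U pairs U hU reach hr x hxn) ?_ ?_
  · intro y hy
    simp only [Bool.not_eq_true'] at hy ⊢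
    by_contra h
    have hmem : y ∈ expandR pairs reach :=
      subset_expandR pairs reach y ((PySem.Set.contains_iff _ _).mp (by simpa using h))
    rw [(PySem.Set.contains_iff _ _).mpr hmem] at hy
    cases hy
  · simpa using hxr
  · simpa using hxn

-- B's while loop: repeat the expansion until the set stops changing.
-- U, hU, hr are proof arguments for termination only.
def saturate (pairs : List (String × String)) (U : List String)
    (hU : ∀ p ∈ pairs, p.1 ∈ U ∧ p.2 ∈ U)
    (reach : PySem.Set String) (hr : ∀ x ∈ reach, x ∈ U) : PySem.Set String :=
  if PySem.Set.equal (expandR pairs reach) reach then reach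
  else saturate pairs U hU (expandR pairs reach)
    (fun x hx => expandR_subset_U pairs U hU reach hr x hx)
  termination_by (U.filter (fun u => !(PySem.Set.contains reach u))).length
  decreasing_by
    exact saturate_dec pairs U hU reach hr (by assumption)

def get_hd_type_alt (defined : List String) (active_pairs : List (String × String)) : String :=
  if defined.isEmpty then "Reflector"
  else
    let motor_to_throat :=
      if defined.contains "Throat" then
        let reach := saturate active_pairs ("Throat" :: nodesOf active_pairs)
          (fun p hp =>
            ⟨List.mem_cons_of_mem _ ((mem_nodesOf active_pairs p.1).mpr ⟨p, hp, Or.inl rfl⟩),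
             List.mem_cons_of_mem _ ((mem_nodesOf active_pairs p.2).mpr ⟨p, hp, Or.inr rfl⟩)⟩)
          ["Throat"] (fun x hx => by simp at hx; simp [hx])
        !(PySem.Set.isdisjoint ["Sacral", "Heart", "Solar Plexus", "Root"] reach)
      else false
    let sacral := defined.contains "Sacral"
    if sacral && motor_to_throat then "Manifesting Generator"
    else if sacral then "Generator"
    else if motor_to_throat then "Manifestor"
    else "Projector"

-- ===== PRECONDITION & SPEC =====
def Spec_get_hd_type (defined : List String) (active_pairs : List (String × String)) (out : String) : Prop := out = get_hd_type_alt defined active_pairs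
instance (defined : List String) (active_pairs : List (String × String)) (out : String) : Decidable (Spec_get_hd_type defined active_pairs out) := by unfold Spec_get_hd_type; infer_instance

-- ===== CLAIM (what is proved, stated in full; the proofs are below) =====
def Claim_equal_get_hd_type : Prop := ∀ (defined : List String) (active_pairs : List (String × String)), Dom_get_hd_type defined active_pairs → Spec_get_hd_type defined active_pairs (get_hd_type defined active_pairs)

-- ===== LEMMAS AND PROOFS =====

-- the undirected edge relation named by active_pairs
def Edge (active_pairs : List (String × String)) (v w : String) : Prop :=
  ∃ p ∈ active_pairs, (p.1 = v ∧ p.2 = w) ∨ (p.1 = w ∧ p.2 = v)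

-- paths of length n in that graph
def PathN (active_pairs : List (String × String)) : Nat → String → String → Prop
  | 0, a, b => a = b
  | n + 1, a, b => ∃ c, Edge active_pairs a c ∧ PathN active_pairs n c b

-- loop invariant for A's search: every edge leaving the visited set lands in visited or the worklist
def Closed (active_pairs : List (String × String)) (visited Q : List String) : Prop :=
  ∀ v ∈ visited, ∀ w, Edge active_pairs v w → w ∈ visited ∨ w ∈ Q

theorem edge_iff (pairs : List (String × String)) (v w : String) :
    Edge pairs v w ↔ w ∈ (buildAdj pairs).getD v [] :=
  (mem_getD_buildAdj_iff pairs v w).symm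

theorem edge_symm (pairs : List (String × String)) {v w : String} (h : Edge pairs v w) :
    Edge pairs w v := by
  obtain ⟨p, hp, h | h⟩ := h
  · exact ⟨p, hp, Or.inr ⟨h.1, h.2⟩⟩
  · exact ⟨p, hp, Or.inl ⟨h.1, h.2⟩⟩

theorem pathN_snoc (pairs : List (String × String)) {n : Nat} {a b c : String}
    (hp : PathN pairs n a b) (he : Edge pairs b c) : PathN pairs (n + 1) a c := by
  induction n generalizing a with
  | zero => exact hp ▸ ⟨c, he, rfl⟩
  | succ n ih =>
    obtain ⟨d, hd, hp'⟩ := hp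
    exact ⟨d, hd, ih hp'⟩

theorem reach_symm (pairs : List (String × String)) {a b : String} {n : Nat}
    (hp : PathN pairs n a b) : ∃ m, PathN pairs m b a := by
  induction n generalizing a with
  | zero => exact ⟨0, hp.symm⟩
  | succ n ih =>
    obtain ⟨c, hc, hp'⟩ := hp
    obtain ⟨m, hm⟩ := ih hp'
    exact ⟨m + 1, pathN_snoc pairs hm (edge_symm pairs hc)⟩

-- a visited node whose neighbourhood is covered by visited ∪ Q can only reach x
-- through visited or through a strictly shorter path from Q
theorem escape (pairs : List (String × String)) (visited Q : List String)
    (hcl : Closed pairs visited Q) (n : Nat) (v x : String)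
    (hv : v ∈ visited) (hp : PathN pairs n v x) :
    x ∈ visited ∨ ∃ q ∈ Q, ∃ m, m < n ∧ PathN pairs m q x := by
  induction n generalizing v with
  | zero => exact Or.inl (hp ▸ hv)
  | succ n ih =>
    obtain ⟨c, hc, hp'⟩ := hp
    rcases hcl v hv c hc with hcv | hcq
    · rcases ih c hcv hp' with h | ⟨q, hq, m, hm, hpq⟩
      · exact Or.inl h
      · exact Or.inr ⟨q, hq, m, Nat.lt_succ_of_lt hm, hpq⟩
    · exact Or.inr ⟨c, hcq, n, Nat.lt_succ_self n, hp'⟩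

theorem mem_cons_iff_dropLast (x : String) (xs : List String) (y : String) :
    y ∈ x :: xs ↔ y ∈ (x :: xs).dropLast ∨ y = (x :: xs).getLast (List.cons_ne_nil x xs) := by
  conv_lhs => rw [← List.dropLast_append_getLast (List.cons_ne_nil x xs)]
  simp

theorem bfsA_iff (pairs : List (String × String)) (U : List String)
    (hadj : ∀ v w, w ∈ (buildAdj pairs).getD v [] → w ∈ U)
    (visited : PySem.Set String) (queue : List String) (hq : ∀ x ∈ queue, x ∈ U)
    (hT : "Throat" ∉ visited) (hcl : Closed pairs visited queue) :
    bfsA (buildAdj pairs) U hadj visited queue hq = true ↔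
      ∃ q ∈ queue, ∃ n, PathN pairs n q "Throat" := by
  fun_induction bfsA (buildAdj pairs) U hadj visited queue hq
  case case1 => simp
  case case2 =>
    rename_i visited x xs hq1 nd h hq2
    exact ⟨fun _ => ⟨_, List.getLast_mem (List.cons_ne_nil x xs), 0, h⟩, fun _ => rfl⟩
  case case3 =>
    rename_i visited x xs hq1 nd hnt hmem hq2 ih
    have hnv : (x :: xs).getLast (List.cons_ne_nil x xs) ∈ visited :=
      (PySem.Set.contains_iff _ _).mp hmem
    have hcl' : Closed pairs visited (x :: xs).dropLast := by
      intro v hv w hw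
      rcases hcl v hv w hw with h | h
      · exact Or.inl h
      · rcases (mem_cons_iff_dropLast x xs w).mp h with h' | rfl
        · exact Or.inr h'
        · exact Or.inl hnv
    rw [ih hT hcl']
    constructor
    · rintro ⟨q, hqm, n, hp⟩
      exact ⟨q, List.mem_of_mem_dropLast hqm, n, hp⟩
    · rintro ⟨q, hqm, n, hp⟩
      rcases (mem_cons_iff_dropLast x xs q).mp hqm with h' | rfl
      · exact ⟨q, h', n, hp⟩
      · rcases escape pairs visited _ hcl' n _ "Throat" hnv hp with h | ⟨q', hq', m, _, hp'⟩
        · exact absurd h hT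
        · exact ⟨q', hq', m, hp'⟩
  case case4 =>
    rename_i visited x xs hq1 nd hnt hmem hq2 ih
    set node := (x :: xs).getLast (List.cons_ne_nil x xs) with hnode
    have hnv : node ∉ visited := fun h => hmem ((PySem.Set.contains_iff _ _).mpr h)
    have hT' : "Throat" ∉ PySem.Set.add visited node := by
      intro h
      rcases (PySem.Set.mem_add _ _ _).mp h with h' | h'
      · exact hT h'
      · exact hnt h'.symm
    have hcl' : Closed pairs (PySem.Set.add visited node)
        ((x :: xs).dropLast ++ (buildAdj pairs).getD node []) := by
      intro v hv w hw
      rcases (PySem.Set.mem_add _ _ _).mp hv with hv' | hveq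
      · rcases hcl v hv' w hw with h | h
        · exact Or.inl ((PySem.Set.mem_add _ _ _).mpr (Or.inl h))
        · rcases (mem_cons_iff_dropLast x xs w).mp h with h' | rfl
          · exact Or.inr (List.mem_append_left _ h')
          · exact Or.inl ((PySem.Set.mem_add _ _ _).mpr (Or.inr rfl))
      · subst hveq
        exact Or.inr (List.mem_append_right _ ((edge_iff pairs _ w).mp hw))
    rw [ih hT' hcl']
    constructor
    · rintro ⟨q, hqm, n, hp⟩
      rcases List.mem_append.mp hqm with h' | h'
      · exact ⟨q, List.mem_of_mem_dropLast h', n, hp⟩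
      · exact ⟨node, List.getLast_mem _, n + 1, ⟨q, (edge_iff pairs node q).mpr h', hp⟩⟩
    · rintro ⟨q, hqm, n, hp⟩
      rcases (mem_cons_iff_dropLast x xs q).mp hqm with h' | rfl
      · exact ⟨q, List.mem_append_left _ h', n, hp⟩
      · match n, hp with
        | 0, hp => exact absurd hp hnt
        | m + 1, ⟨c, hc, hp'⟩ =>
          exact ⟨c, List.mem_append_right _ ((edge_iff pairs _ c).mp hc), m, hp'⟩

theorem motor_search_iff (pairs : List (String × String)) (U : List String)
    (hadj : ∀ v w, w ∈ (buildAdj pairs).getD v [] → w ∈ U)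
    (motor : String) (hq : ∀ x ∈ [motor], x ∈ U) (hne : motor ≠ "Throat") :
    (if !((buildAdj pairs).contains motor) then false
     else bfsA (buildAdj pairs) U hadj [] [motor] hq) = true ↔
      ∃ n, PathN pairs n motor "Throat" := by
  by_cases hc : (buildAdj pairs).contains motor
  · rw [if_neg (by simp [hc])]
    rw [bfsA_iff pairs U hadj [] [motor] hq (List.not_mem_nil) (fun v hv => absurd hv (List.not_mem_nil))]
    simp
  · rw [if_pos (by simp only [Bool.not_eq_true'] at hc ⊢; simpa using hc)]
    have hcf : (buildAdj pairs).contains motor = false := by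
      simpa [Bool.not_eq_true'] using hc
    have hget : (buildAdj pairs).getD motor [] = [] :=
      PySem.Dict.getD_of_not_contains _ _ hcf
    constructor
    · intro h; exact absurd h (by simp)
    · rintro ⟨n, hp⟩
      match n, hp with
      | 0, hp => exact absurd hp hne
      | m + 1, ⟨c, hcc, hp'⟩ =>
        have : c ∈ (buildAdj pairs).getD motor [] := (edge_iff pairs motor c).mp hcc
        rw [hget] at this
        exact absurd this (List.not_mem_nil)

-- B-side: the saturated set is sound (everything in it is reachable from the seeds) …
theorem saturate_sound (pairs : List (String × String)) (U : List String)
    (hU : ∀ p ∈ pairs, p.1 ∈ U ∧ p.2 ∈ U) (reach : PySem.Set String)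
    (hr : ∀ x ∈ reach, x ∈ U)
    (hinv : ∀ x ∈ reach, ∃ n, PathN pairs n "Throat" x) :
    ∀ x ∈ saturate pairs U hU reach hr, ∃ n, PathN pairs n "Throat" x := by
  fun_induction saturate pairs U hU reach hr
  case case1 => intro x hx; exact hinv x hx
  case case2 =>
    rename_i reach hr heq ih
    apply ih
    intro x hx
    rcases (mem_expandR pairs reach x).mp hx with h | ⟨p, hp, ⟨h1, rfl⟩ | ⟨h1, rfl⟩⟩
    · exact hinv x h
    · obtain ⟨n, hn⟩ := hinv p.1 h1
      exact ⟨n + 1, pathN_snoc pairs hn ⟨p, hp, Or.inl ⟨rfl, rfl⟩⟩⟩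
    · obtain ⟨n, hn⟩ := hinv p.2 h1
      exact ⟨n + 1, pathN_snoc pairs hn ⟨p, hp, Or.inr ⟨rfl, rfl⟩⟩⟩

-- … contains its seeds …
theorem saturate_superset (pairs : List (String × String)) (U : List String)
    (hU : ∀ p ∈ pairs, p.1 ∈ U ∧ p.2 ∈ U) (reach : PySem.Set String)
    (hr : ∀ x ∈ reach, x ∈ U) :
    ∀ x ∈ reach, x ∈ saturate pairs U hU reach hr := by
  fun_induction saturate pairs U hU reach hr
  case case1 => intro x hx; exact hx
  case case2 =>
    rename_i reach hr heq ih
    intro x hx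
    exact ih x (subset_expandR pairs reach x hx)

-- … and is closed under the edge relation
theorem saturate_closed (pairs : List (String × String)) (U : List String)
    (hU : ∀ p ∈ pairs, p.1 ∈ U ∧ p.2 ∈ U) (reach : PySem.Set String)
    (hr : ∀ x ∈ reach, x ∈ U) :
    ∀ y ∈ saturate pairs U hU reach hr, ∀ x, Edge pairs y x →
      x ∈ saturate pairs U hU reach hr := by
  fun_induction saturate pairs U hU reach hr
  case case1 =>
    rename_i reach hr heq
    intro y hy x hx
    obtain ⟨p, hp, ⟨h1, h2⟩ | ⟨h1, h2⟩⟩ := hx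
    · exact ((PySem.Set.equal_iff _ _).mp heq x).mp
        ((mem_expandR pairs reach x).mpr (Or.inr ⟨p, hp, Or.inl ⟨h1 ▸ hy, h2⟩⟩))
    · exact ((PySem.Set.equal_iff _ _).mp heq x).mp
        ((mem_expandR pairs reach x).mpr (Or.inr ⟨p, hp, Or.inr ⟨h2 ▸ hy, h1⟩⟩))
  case case2 =>
    rename_i reach hr heq ih
    exact ih

theorem saturate_complete (pairs : List (String × String)) (U : List String)
    (hU : ∀ p ∈ pairs, p.1 ∈ U ∧ p.2 ∈ U) (reach : PySem.Set String)
    (hr : ∀ x ∈ reach, x ∈ U) (n : Nat) (a x : String)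
    (ha : a ∈ saturate pairs U hU reach hr) (hp : PathN pairs n a x) :
    x ∈ saturate pairs U hU reach hr := by
  induction n generalizing a with
  | zero => exact hp ▸ ha
  | succ n ih =>
    obtain ⟨c, hc, hp'⟩ := hp
    exact ih c (saturate_closed pairs U hU reach hr a ha c hc) hp'

theorem not_isdisjoint_iff (s t : List String) :
    (!(PySem.Set.isdisjoint s t)) = true ↔ ∃ m ∈ s, m ∈ t := by
  rw [Bool.not_eq_true']
  constructor
  · intro h
    by_contra hno
    push_neg at hno
    rw [(PySem.Set.isdisjoint_iff s t).mpr hno] at h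
    cases h
  · rintro ⟨m, hm, hmt⟩
    by_contra hdis
    have hd : PySem.Set.isdisjoint s t = true := by
      simpa [Bool.not_eq_false] using hdis
    exact absurd hmt ((PySem.Set.isdisjoint_iff s t).mp hd m hm)

-- the two motor_to_throat computations agree
theorem mttAB (active_pairs : List (String × String)) :
    (["Sacral", "Heart", "Solar Plexus", "Root"].any (fun motor =>
      if !((buildAdj active_pairs).contains motor) then false
      else bfsA (buildAdj active_pairs) (motor :: nodesOf active_pairs)
        (fun v w hw => List.mem_cons_of_mem _ (mem_getD_buildAdj_nodes active_pairs v w hw))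
        [] [motor] (fun y hy => by simp at hy; simp [hy])))
    = !(PySem.Set.isdisjoint ["Sacral", "Heart", "Solar Plexus", "Root"]
        (saturate active_pairs ("Throat" :: nodesOf active_pairs)
          (fun p hp =>
            ⟨List.mem_cons_of_mem _ ((mem_nodesOf active_pairs p.1).mpr ⟨p, hp, Or.inl rfl⟩),
             List.mem_cons_of_mem _ ((mem_nodesOf active_pairs p.2).mpr ⟨p, hp, Or.inr rfl⟩)⟩)
          ["Throat"] (fun x hx => by simp at hx; simp [hx]))) := by
  rw [Bool.eq_iff_iff]
  rw [List.any_eq_true, not_isdisjoint_iff]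
  constructor
  · rintro ⟨m, hm, hf⟩
    have hne : m ≠ "Throat" := by
      have h := hm
      simp only [List.mem_cons, List.not_mem_nil, or_false] at h
      rcases h with rfl | rfl | rfl | rfl <;> decide
    rw [motor_search_iff _ _ _ _ _ hne] at hf
    obtain ⟨n, hp⟩ := hf
    obtain ⟨k, hk⟩ := reach_symm active_pairs hp
    refine ⟨m, hm, ?_⟩
    exact saturate_complete active_pairs _ _ ["Throat"] _ k "Throat" m
      (saturate_superset active_pairs _ _ ["Throat"] _ "Throat" (by simp)) hk
  · rintro ⟨m, hm, hseen⟩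
    have hreach : ∃ n, PathN active_pairs n "Throat" m :=
      saturate_sound active_pairs _ _ ["Throat"] _
        (fun x hx => by
          rw [List.mem_singleton] at hx
          exact ⟨0, hx.symm⟩) m hseen
    obtain ⟨n, hp⟩ := hreach
    obtain ⟨k, hk⟩ := reach_symm active_pairs hp
    have hne : m ≠ "Throat" := by
      have h := hm
      simp only [List.mem_cons, List.not_mem_nil, or_false] at h
      rcases h with rfl | rfl | rfl | rfl <;> decide
    refine ⟨m, hm, ?_⟩
    rw [motor_search_iff _ _ _ _ _ hne]
    exact ⟨k, hk⟩

-- ===== VERDICT (by name: the statement is the Claim_ definition above) =====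
theorem get_hd_type_spec : Claim_equal_get_hd_type := by
  intro defined active_pairs _
  unfold Spec_get_hd_type
  by_cases he : defined.isEmpty
  · simp [get_hd_type, get_hd_type_alt, he]
  · simp only [get_hd_type, get_hd_type_alt, he, Bool.false_eq_true, if_false]
    rw [mttAB active_pairs]
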